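-- pv_equiv track=rewrite | github.com/michelaquino/algorithms_data_structures_review | implemented_in_golang/books/cracking_code_interview/chapter_5/questions/5_3.py | get_array_representation
-- ===== SOURCE A (Python) =====
-- def get_array_representation(number):
--     looking_for = 0
--     array = []
--
--     count = 0
--     # 32 bits
--     for i in range (32):
--         if (number & 1) != looking_for:
--             looking_for = looking_for ^ 1
--             array.append(count)
--             count = 0
--
--         count += 1
--         number = number >> 1
--
--     return array
-- ===== SOURCE B (Python) =====
-- from itertools import groupby
--
-- def get_array_representation(number):
--     bits = [(number >> i) & 1 for i in range(32)]
--     runs = [len(list(g)) for _, g in groupby(bits)]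
--     return ([0] if bits[0] == 1 else []) + runs[:-1]
-- ===== Notes on version B (the rewrite author's own statement) =====
-- stated objective: alternative
-- what changed: B materializes the LSB-first bit list of all thirty-two bits and computes run lengths with itertools.groupby, then prepends the leading-zero run marker and drops the never-closed final run, instead of A's single-pass looking_for/count state machine.
import Mathlib
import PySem

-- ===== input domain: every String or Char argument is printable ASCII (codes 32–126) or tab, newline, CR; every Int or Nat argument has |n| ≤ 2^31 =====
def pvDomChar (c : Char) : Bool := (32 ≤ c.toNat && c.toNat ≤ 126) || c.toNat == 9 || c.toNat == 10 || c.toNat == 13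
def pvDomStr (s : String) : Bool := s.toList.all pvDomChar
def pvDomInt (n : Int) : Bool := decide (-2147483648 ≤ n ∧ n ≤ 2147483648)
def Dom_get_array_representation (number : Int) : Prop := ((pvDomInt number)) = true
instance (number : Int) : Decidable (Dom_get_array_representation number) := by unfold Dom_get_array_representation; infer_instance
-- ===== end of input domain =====

-- B re-implements the run-length extraction via an explicit bit list + groupby-style
-- run grouping instead of A's one-pass state machine; objective: alternative decomposition (no speed claim).


-- ===== PORT A =====
-- literal transliteration of A's loop: state (looking_for, array, count, number), 32 iterations
def get_array_representation (number : Int) : List Int :=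
  let res := (PySem.List.pyRange 0 32 1).foldl
    (fun (st : Int × List Int × Int × Int) _i =>
      let lf := st.1; let arr := st.2.1; let cnt := st.2.2.1; let num := st.2.2.2
      let (lf, arr, cnt) :=
        if PySem.Int.band num 1 ≠ lf then (PySem.Int.bxor lf 1, arr ++ [cnt], (0 : Int))
        else (lf, arr, cnt)
      (lf, arr, cnt + 1, num >>> (1 : Nat)))
    ((0 : Int), ([] : List Int), (0 : Int), number)
  res.2.1

-- ===== PORT B =====
-- groupby(bits): run lengths, given the current key and its count so far
def pvGrp (key cnt : Int) : List Int → List Int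
  | [] => [cnt]
  | b :: bs => if b = key then pvGrp key (cnt + 1) bs else cnt :: pvGrp b 1 bs

-- [len(list(g)) for _, g in groupby(bits)]
def pvGroupRuns : List Int → List Int
  | [] => []
  | b :: bs => pvGrp b 1 bs

def get_array_representation_alt (number : Int) : List Int :=
  -- i drawn from range(32) is nonnegative, so .toNat is exact for Python's `number >> i`
  let bits := (PySem.List.pyRange 0 32 1).map (fun i => PySem.Int.band (number >>> i.toNat) 1)
  let runs := pvGroupRuns bits
  (if PySem.List.pyGet? bits 0 = some 1 then [0] else []) ++ PySem.List.slice runs none (some (-1))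

-- ===== PRECONDITION & SPEC =====
def Spec_get_array_representation (number : Int) (out : List Int) : Prop := out = get_array_representation_alt number
instance (number : Int) (out : List Int) : Decidable (Spec_get_array_representation number out) := by unfold Spec_get_array_representation; infer_instance

-- ===== CLAIM (what is proved, stated in full; the proofs are below) =====
def Claim_equal_get_array_representation : Prop := ∀ (number : Int), Dom_get_array_representation number → Spec_get_array_representation number (get_array_representation number)

-- ===== LEMMAS AND PROOFS =====

-- the LSB-first bit list consumed by both programs
def pvBitsOf : Nat → Int → List Int
  | 0, _ => []
  | k + 1, n => PySem.Int.band n 1 :: pvBitsOf k (n >>> (1 : Nat))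

-- A's loop body as a single step function on its state
def pvStepA (st : Int × List Int × Int × Int) : Int × List Int × Int × Int :=
  let lf := st.1; let arr := st.2.1; let cnt := st.2.2.1; let num := st.2.2.2
  let (lf, arr, cnt) :=
    if PySem.Int.band num 1 ≠ lf then (PySem.Int.bxor lf 1, arr ++ [cnt], (0 : Int))
    else (lf, arr, cnt)
  (lf, arr, cnt + 1, num >>> (1 : Nat))

def pvIterA : Nat → (Int × List Int × Int × Int) → (Int × List Int × Int × Int)
  | 0, st => st
  | k + 1, st => pvIterA k (pvStepA st)

lemma pv_band01 (n : Int) : PySem.Int.band n 1 = 0 ∨ PySem.Int.band n 1 = 1 := by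
  rw [PySem.Int.band_one]
  have h1 := PySem.Int.mod_nonneg n (by norm_num : (0:Int) < 2)
  have h2 := PySem.Int.mod_lt n (by norm_num : (0:Int) < 2)
  omega

lemma pv_pyGet0 (b : Int) (l : List Int) : PySem.List.pyGet? (b :: l) 0 = some b := by
  simp [PySem.List.pyGet?, PySem.List.pyIdx?]

lemma pv_foldl_ignore (l : List Int) (st : Int × List Int × Int × Int) :
    l.foldl (fun s (_ : Int) => pvStepA s) st = pvIterA l.length st := by
  induction l generalizing st with
  | nil => rfl
  | cons x xs ih => simp [List.foldl, pvIterA, ih]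

lemma pvGrp_ne_nil (key cnt : Int) (l : List Int) : pvGrp key cnt l ≠ [] := by
  induction l generalizing key cnt with
  | nil => simp [pvGrp]
  | cons b bs ih =>
    simp only [pvGrp]
    split
    · exact ih _ _
    · simp

lemma pv_iterA_eq (k : Nat) :
    ∀ (lf cnt : Int) (arr : List Int) (num : Int), (lf = 0 ∨ lf = 1) →
      (pvIterA k (lf, arr, cnt, num)).2.1 = arr ++ (pvGrp lf cnt (pvBitsOf k num)).dropLast := by
  induction k with
  | zero => intro lf cnt arr num _; simp [pvIterA, pvBitsOf, pvGrp]
  | succ k ih =>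
    intro lf cnt arr num hlf
    have hb := pv_band01 num
    by_cases hbl : PySem.Int.band num 1 = lf
    · -- same bit: count it
      have hstep : pvStepA (lf, arr, cnt, num) = (lf, arr, cnt + 1, num >>> (1 : Nat)) := by
        simp [pvStepA, hbl]
      simp only [pvIterA, hstep, pvBitsOf, pvGrp, hbl]
      exact ih lf (cnt + 1) arr (num >>> (1 : Nat)) hlf
    · -- bit flips: close the current run
      have hx : PySem.Int.bxor lf 1 = PySem.Int.band num 1 := by
        rcases hlf with h | h <;> rcases hb with h' | h' <;> simp_all <;> decide
      have hstep : pvStepA (lf, arr, cnt, num) =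
          (PySem.Int.band num 1, arr ++ [cnt], 0 + 1, num >>> (1 : Nat)) := by
        simp [pvStepA, hbl, hx]
      simp only [pvIterA, hstep, pvBitsOf]
      have := ih (PySem.Int.band num 1) (0 + 1) (arr ++ [cnt]) (num >>> (1 : Nat)) hb
      rw [this]
      have hgrp : pvGrp lf cnt (PySem.Int.band num 1 :: pvBitsOf k (num >>> (1 : Nat)))
          = cnt :: pvGrp (PySem.Int.band num 1) 1 (pvBitsOf k (num >>> (1 : Nat))) := by
        simp [pvGrp, hbl]
      rw [hgrp, List.dropLast_cons_of_ne_nil (pvGrp_ne_nil _ _ _), List.append_assoc]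
      norm_num

lemma pv_bits_range (k : Nat) (n : Int) :
    List.map (fun (j : Nat) => PySem.Int.band (n >>> j) 1) (List.range k) = pvBitsOf k n := by
  induction k generalizing n with
  | zero => rfl
  | succ k ih =>
    rw [List.range_succ_eq_map, List.map_cons, List.map_map]
    have hh : ((fun (j : Nat) => PySem.Int.band (n >>> j) 1) ∘ Nat.succ)
        = (fun (j : Nat) => PySem.Int.band ((n >>> (1 : Nat)) >>> j) 1) := by
      funext j
      simp only [Function.comp_apply]
      rw [← Int.shiftRight_add, Nat.add_comm]
    rw [hh, ih (n >>> (1 : Nat))]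
    simp only [pvBitsOf, Int.shiftRight_zero]

lemma pv_bits_map (k : Nat) (n : Int) :
    (PySem.List.pyRange 0 k 1).map (fun i => PySem.Int.band (n >>> i.toNat) 1) = pvBitsOf k n := by
  rw [PySem.List.pyRange_one, List.map_map, ← pv_bits_range k n]
  apply List.map_congr_left
  intro j hj
  simp [Function.comp, Int.shiftRight_natCast_right]

lemma pv_bits_map32 (n : Int) :
    (PySem.List.pyRange 0 32 1).map (fun i => PySem.Int.band (n >>> i.toNat) 1) = pvBitsOf 32 n := by
  have h := pv_bits_map 32 n
  norm_num at h
  exact h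

lemma pv_altB (number : Int) :
    get_array_representation_alt number =
      (if PySem.List.pyGet? (pvBitsOf 32 number) 0 = some 1 then [0] else [])
        ++ (pvGroupRuns (pvBitsOf 32 number)).dropLast := by
  simp only [get_array_representation_alt, pv_bits_map32 number, PySem.List.slice_to_neg_one]

lemma pv_A (number : Int) :
    get_array_representation number = (pvIterA 32 ((0:Int), ([]:List Int), (0:Int), number)).2.1 := by
  simp only [get_array_representation]
  rw [show (fun (st : Int × List Int × Int × Int) (_i : Int) =>
        let lf := st.1; let arr := st.2.1; let cnt := st.2.2.1; let num := st.2.2.2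
        let (lf, arr, cnt) :=
          if PySem.Int.band num 1 ≠ lf then (PySem.Int.bxor lf 1, arr ++ [cnt], (0 : Int))
          else (lf, arr, cnt)
        (lf, arr, cnt + 1, num >>> (1 : Nat)))
      = (fun (s : Int × List Int × Int × Int) (_ : Int) => pvStepA s) from rfl]
  rw [pv_foldl_ignore]
  have hlen : (PySem.List.pyRange 0 32 1).length = 32 := by decide
  rw [hlen]

-- ===== VERDICT (by name: the statement is the Claim_ definition above) =====
theorem get_array_representation_spec : Claim_equal_get_array_representation := by
  intro number _
  unfold Spec_get_array_representation
  rw [pv_A, pv_altB, pv_iterA_eq 32 0 0 [] number (Or.inl rfl)]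
  have h32 : pvBitsOf 32 number
      = PySem.Int.band number 1 :: pvBitsOf 31 (number >>> (1 : Nat)) := rfl
  rcases pv_band01 number with hb | hb
  · rw [h32, hb, pv_pyGet0]
    simp [pvGroupRuns, pvGrp]
  · rw [h32, hb, pv_pyGet0]
    simp only [pvGroupRuns, pvGrp, List.nil_append]
    rw [if_neg (by decide : ¬ (1:Int) = 0)]
    rw [List.dropLast_cons_of_ne_nil (pvGrp_ne_nil _ _ _)]
    rfl
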